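-- pv_equiv track=rewrite | github.com/tablofan/CompetitiveProgramming | practice/decorationWays.py | rec
-- ===== SOURCE A (Python) =====
-- from math import factorial
--
-- def rec(n, r, g, b):
--     if r < 0 or g < 0 or b < 0:
--         return 0
--     if n == 1:
--         return sum([1 if r else 0, 1 if g else 0, 1 if b else 0])
--     d2, d3 = n // 2 if not n % 2 else 0, n // 3 if not n % 3 else 0
--     ans = rec(n - 1, r - n, g, b) + rec(n - 1, r, g - n, b) + rec(n - 1, r, g, b - n)
--     if d2:
--         ans += (factorial(n) // (factorial(d2) * factorial(d2))) * (rec(n - 1, r - d2, g - d2, b) + rec(n - 1, r - d2, g, b - d2) + rec(n - 1, r, g - d2, b - d2))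
--     if d3:
--         ans += (factorial(n) // (factorial(d3) * factorial(d3) * factorial(d3))) * rec(n - 1, r - d3, g - d3, b - d3)
--     return ans
-- ===== SOURCE B (Python) =====
-- from math import factorial
--
-- def rec(n, r, g, b):
--     # top-down recursion memoized on the (n, r, g, b) state
--     memo = {}
--
--     def go(n, r, g, b):
--         if r < 0 or g < 0 or b < 0:
--             return 0
--         if n == 1:
--             return (1 if r else 0) + (1 if g else 0) + (1 if b else 0)
--         key = (n, r, g, b)
--         if key in memo:
--             return memo[key]
--         d2 = n // 2 if n % 2 == 0 else 0
--         d3 = n // 3 if n % 3 == 0 else 0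
--         ans = go(n - 1, r - n, g, b) + go(n - 1, r, g - n, b) + go(n - 1, r, g, b - n)
--         if d2:
--             ans += (factorial(n) // (factorial(d2) * factorial(d2))) * (
--                 go(n - 1, r - d2, g - d2, b) + go(n - 1, r - d2, g, b - d2) + go(n - 1, r, g - d2, b - d2))
--         if d3:
--             ans += (factorial(n) // (factorial(d3) * factorial(d3) * factorial(d3))) * go(n - 1, r - d3, g - d3, b - d3)
--         memo[key] = ans
--         return ans
--
--     return go(n, r, g, b)
-- ===== Notes on version B (the rewrite author's own statement) =====
-- stated objective: alternative
-- what changed: B memoizes the recursion on its full (n, r, g, b) state in a dict, so each distinct state is computed once instead of the plain recursion re-expanding up to 7 subtrees per level (a large win only when budgets make states repeat; on the random timing inputs states barely repeat, so no speed is claimed); Pre_rec excludes n <= 0 with nonnegative r, g, b, where A recurses forever (RecursionError).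
import Mathlib
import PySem

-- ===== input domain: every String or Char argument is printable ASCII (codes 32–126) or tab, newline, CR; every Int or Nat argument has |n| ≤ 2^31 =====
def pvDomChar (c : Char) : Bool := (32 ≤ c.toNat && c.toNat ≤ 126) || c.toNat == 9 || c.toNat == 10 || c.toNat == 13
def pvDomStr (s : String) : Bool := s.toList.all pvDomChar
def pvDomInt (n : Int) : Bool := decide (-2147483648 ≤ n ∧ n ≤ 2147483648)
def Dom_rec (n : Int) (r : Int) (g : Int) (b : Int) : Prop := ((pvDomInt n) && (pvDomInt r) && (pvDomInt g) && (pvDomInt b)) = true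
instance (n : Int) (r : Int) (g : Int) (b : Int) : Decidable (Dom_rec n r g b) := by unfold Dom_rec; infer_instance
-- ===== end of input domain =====

-- B memoizes A's recursion on its full (n, r, g, b) state, computing each reachable state once.
-- Pre_rec excludes n ≤ 0 with r, g, b all ≥ 0, where the Python A recurses without bound (RecursionError).

-- ===== PORT A =====
-- factorial(k): exact for k ≥ 0, the only arguments it is applied to here
def pyFact (k : Int) : Int := (Nat.factorial k.toNat : Int)

-- the recursion of A; fuel = n.toNat makes the descent n, n-1, …, 1 structural (fuel 0 is
-- reachable only for n ≤ 0, where the Python recurses without bound — outside Pre_rec)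
def recFuel : Nat → Int → Int → Int → Int → Int
  | fuel, n, r, g, b =>
    if r < 0 ∨ g < 0 ∨ b < 0 then 0
    else if n = 1 then
      (if r ≠ 0 then 1 else 0) + (if g ≠ 0 then 1 else 0) + (if b ≠ 0 then 1 else 0)
    else match fuel with
    | 0 => 0
    | fuel + 1 =>
      let d2 := if PySem.Int.mod n 2 = 0 then PySem.Int.floordiv n 2 else 0
      let d3 := if PySem.Int.mod n 3 = 0 then PySem.Int.floordiv n 3 else 0
      let ans := recFuel fuel (n-1) (r-n) g b + recFuel fuel (n-1) r (g-n) b +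
        recFuel fuel (n-1) r g (b-n)
      let ans := if d2 ≠ 0 then
          ans + (PySem.Int.floordiv (pyFact n) (pyFact d2 * pyFact d2)) *
            (recFuel fuel (n-1) (r-d2) (g-d2) b + recFuel fuel (n-1) (r-d2) g (b-d2) +
              recFuel fuel (n-1) r (g-d2) (b-d2))
        else ans
      let ans := if d3 ≠ 0 then
          ans + (PySem.Int.floordiv (pyFact n) (pyFact d3 * pyFact d3 * pyFact d3)) *
            recFuel fuel (n-1) (r-d3) (g-d3) (b-d3)
        else ans
      ans

def rec (n : Int) (r : Int) (g : Int) (b : Int) : Int := recFuel n.toNat n r g b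

-- ===== PORT B =====
-- go(n, r, g, b) with the memo dict threaded through explicitly; same fuel convention as recFuel
def goB : Nat → Int → Int → Int → Int → PySem.Dict (Int × Int × Int × Int) Int →
    Int × PySem.Dict (Int × Int × Int × Int) Int
  | fuel, n, r, g, b, memo =>
    if r < 0 ∨ g < 0 ∨ b < 0 then (0, memo)
    else if n = 1 then
      ((if r ≠ 0 then 1 else 0) + (if g ≠ 0 then 1 else 0) + (if b ≠ 0 then 1 else 0), memo)
    else match fuel with
    | 0 => (0, memo)
    | fuel + 1 =>
      match memo.get? (n, r, g, b) with
      | some v => (v, memo)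
      | none =>
        let d2 := if PySem.Int.mod n 2 = 0 then PySem.Int.floordiv n 2 else 0
        let d3 := if PySem.Int.mod n 3 = 0 then PySem.Int.floordiv n 3 else 0
        let p1 := goB fuel (n-1) (r-n) g b memo
        let p2 := goB fuel (n-1) r (g-n) b p1.2
        let p3 := goB fuel (n-1) r g (b-n) p2.2
        let q :=
          if d2 ≠ 0 then
            let c1 := goB fuel (n-1) (r-d2) (g-d2) b p3.2
            let c2 := goB fuel (n-1) (r-d2) g (b-d2) c1.2
            let c3 := goB fuel (n-1) r (g-d2) (b-d2) c2.2
            (p1.1 + p2.1 + p3.1 +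
              (PySem.Int.floordiv (pyFact n) (pyFact d2 * pyFact d2)) * (c1.1 + c2.1 + c3.1), c3.2)
          else (p1.1 + p2.1 + p3.1, p3.2)
        let w :=
          if d3 ≠ 0 then
            let c4 := goB fuel (n-1) (r-d3) (g-d3) (b-d3) q.2
            (q.1 + (PySem.Int.floordiv (pyFact n) (pyFact d3 * pyFact d3 * pyFact d3)) * c4.1, c4.2)
          else q
        (w.1, w.2.insert (n, r, g, b) w.1)

def rec_alt (n : Int) (r : Int) (g : Int) (b : Int) : Int :=
  (goB n.toNat n r g b PySem.Dict.empty).1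

-- ===== PRECONDITION & SPEC =====
-- Pre_rec excludes exactly the inputs where A raises (unbounded recursion): n ≤ 0 with r, g, b all ≥ 0.
def Pre_rec (n : Int) (r : Int) (g : Int) (b : Int) : Prop :=
  1 ≤ n ∨ r < 0 ∨ g < 0 ∨ b < 0
instance (n : Int) (r : Int) (g : Int) (b : Int) : Decidable (Pre_rec n r g b) := by
  unfold Pre_rec; infer_instance

def pvWitness_rec : Int × Int × Int × Int := (3, 4, 2, 1)

def Spec_rec (n : Int) (r : Int) (g : Int) (b : Int) (out : Int) : Prop := out = rec_alt n r g b
instance (n : Int) (r : Int) (g : Int) (b : Int) (out : Int) : Decidable (Spec_rec n r g b out) := by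
  unfold Spec_rec; infer_instance

-- ===== CLAIM (what is proved, stated in full; the proofs are below) =====
def Claim_equal_rec : Prop :=
  ∀ (n : Int) (r : Int) (g : Int) (b : Int), Dom_rec n r g b → Pre_rec n r g b →
    Spec_rec n r g b (rec n r g b)

-- ===== LEMMAS AND PROOFS =====

-- every value stored in the memo is the corresponding value of A's recursion
def MemoOK (m : PySem.Dict (Int × Int × Int × Int) Int) : Prop :=
  ∀ k v, m.get? k = some v → v = rec k.1 k.2.1 k.2.2.1 k.2.2.2

theorem memoOK_insert (n r g b x : Int) (m : PySem.Dict (Int × Int × Int × Int) Int)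
    (hm : MemoOK m) (hx : x = rec n r g b) : MemoOK (m.insert (n, r, g, b) x) := by
  intro k v hk
  rw [PySem.Dict.get?_insert] at hk
  by_cases hke : k = (n, r, g, b)
  · rw [if_pos hke] at hk
    cases hk
    subst hke
    exact hx
  · rw [if_neg hke] at hk
    exact hm k v hk

theorem goB_correct : ∀ (fuel : Nat) (n r g b : Int) (m : PySem.Dict (Int × Int × Int × Int) Int),
    n.toNat = fuel → MemoOK m →
    (goB fuel n r g b m).1 = recFuel fuel n r g b ∧ MemoOK (goB fuel n r g b m).2 := by
  intro fuel
  induction fuel with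
  | zero =>
    intro n r g b m hf hm
    rw [goB, recFuel]
    by_cases h1 : r < 0 ∨ g < 0 ∨ b < 0
    · rw [if_pos h1, if_pos h1]; exact ⟨rfl, hm⟩
    rw [if_neg h1, if_neg h1]
    by_cases h2 : n = 1
    · omega
    rw [if_neg h2, if_neg h2]
    exact ⟨rfl, hm⟩
  | succ f IH =>
    intro n r g b m hf hm
    rw [goB]
    by_cases h1 : r < 0 ∨ g < 0 ∨ b < 0
    · rw [if_pos h1, recFuel, if_pos h1]; exact ⟨rfl, hm⟩
    rw [if_neg h1]
    by_cases h2 : n = 1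
    · rw [if_pos h2, recFuel, if_neg h1, if_pos h2]; exact ⟨rfl, hm⟩
    rw [if_neg h2]
    have hrw : rec n r g b = recFuel (f + 1) n r g b := by rw [rec, hf]
    have hM : (n - 1).toNat = f := by omega
    cases hget : m.get? (n, r, g, b) with
    | some v =>
      exact ⟨(hm (n, r, g, b) v hget).trans hrw, hm⟩
    | none =>
      dsimp only
      set D2 := (if PySem.Int.mod n 2 = 0 then PySem.Int.floordiv n 2 else 0) with hD2
      set D3 := (if PySem.Int.mod n 3 = 0 then PySem.Int.floordiv n 3 else 0) with hD3
      obtain ⟨e1, i1⟩ := IH (n-1) (r-n) g b m hM hm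
      obtain ⟨e2, i2⟩ := IH (n-1) r (g-n) b _ hM i1
      obtain ⟨e3, i3⟩ := IH (n-1) r g (b-n) _ hM i2
      by_cases hd2 : D2 ≠ 0 <;> by_cases hd3 : D3 ≠ 0 <;>
        simp only [if_pos hd2, if_neg hd2, if_pos hd3, if_neg hd3]
      · obtain ⟨c1, j1⟩ := IH (n-1) (r-D2) (g-D2) b _ hM i3
        obtain ⟨c2, j2⟩ := IH (n-1) (r-D2) g (b-D2) _ hM j1
        obtain ⟨c3, j3⟩ := IH (n-1) r (g-D2) (b-D2) _ hM j2
        obtain ⟨c4, j4⟩ := IH (n-1) (r-D3) (g-D3) (b-D3) _ hM j3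
        refine (fun hv => ⟨hv, memoOK_insert n r g b _ _ j4 (hv.trans hrw.symm)⟩) ?_
        conv_rhs => rw [recFuel]
        rw [if_neg h1, if_neg h2]
        dsimp only
        rw [← hD2, ← hD3, if_pos hd2, if_pos hd3, e1, e2, e3, c1, c2, c3, c4]
      · obtain ⟨c1, j1⟩ := IH (n-1) (r-D2) (g-D2) b _ hM i3
        obtain ⟨c2, j2⟩ := IH (n-1) (r-D2) g (b-D2) _ hM j1
        obtain ⟨c3, j3⟩ := IH (n-1) r (g-D2) (b-D2) _ hM j2
        refine (fun hv => ⟨hv, memoOK_insert n r g b _ _ j3 (hv.trans hrw.symm)⟩) ?_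
        conv_rhs => rw [recFuel]
        rw [if_neg h1, if_neg h2]
        dsimp only
        rw [← hD2, ← hD3, if_pos hd2, if_neg hd3, e1, e2, e3, c1, c2, c3]
      · obtain ⟨c4, j4⟩ := IH (n-1) (r-D3) (g-D3) (b-D3) _ hM i3
        refine (fun hv => ⟨hv, memoOK_insert n r g b _ _ j4 (hv.trans hrw.symm)⟩) ?_
        conv_rhs => rw [recFuel]
        rw [if_neg h1, if_neg h2]
        dsimp only
        rw [← hD2, ← hD3, if_neg hd2, if_pos hd3, e1, e2, e3, c4]
      · refine (fun hv => ⟨hv, memoOK_insert n r g b _ _ i3 (hv.trans hrw.symm)⟩) ?_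
        conv_rhs => rw [recFuel]
        rw [if_neg h1, if_neg h2]
        dsimp only
        rw [← hD2, ← hD3, if_neg hd2, if_neg hd3, e1, e2, e3]

theorem rec_spec : Claim_equal_rec := by
  intro n r g b _ _
  unfold Spec_rec rec_alt rec
  have h := goB_correct n.toNat n r g b PySem.Dict.empty rfl
    (by intro k v hk; rw [PySem.Dict.get?_empty] at hk; cases hk)
  exact h.1.symm
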